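-- pv_equiv track=rewrite | github.com/Rohitrky2021/JavaSourceCode | =EXAMTIME/1_TradeDesk/FirstArraySecondArray LCP/p.py | solve
-- ===== SOURCE A (Python) =====
-- def solve(first_list, second_list):
--     longest = 0
--     for num1 in first_list:
--         str1 = str(num1)
--         for num2 in second_list:
--             str2 = str(num2)
--             i = 0
--             while i < len(str1) and i < len(str2) and str1[i] == str2[i]:
--                 i += 1
--             longest = max(longest, i)
--     return longest
-- ===== SOURCE B (Python) =====
-- def solve(first_list, second_list):
--     # Build the set of all non-empty prefixes of the second list's decimal strings,
--     # then each first-list string is scanned once against that set.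
--     prefixes = set()
--     for num in second_list:
--         p = ""
--         for ch in str(num):
--             p += ch
--             prefixes.add(p)
--     best = 0
--     for num in first_list:
--         p = ""
--         k = 0
--         for ch in str(num):
--             p += ch
--             k += 1
--             if p in prefixes:
--                 best = max(best, k)
--     return best
-- ===== Notes on version B (the rewrite author's own statement) =====
-- stated objective: faster
-- what changed: Replaces A's nested all-pairs loop with comparison by character with a hash set of every non-empty prefix of the second list's strings, built once; each first-list string is then scanned once, checking its growing prefix against the set.
import Mathlib
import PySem

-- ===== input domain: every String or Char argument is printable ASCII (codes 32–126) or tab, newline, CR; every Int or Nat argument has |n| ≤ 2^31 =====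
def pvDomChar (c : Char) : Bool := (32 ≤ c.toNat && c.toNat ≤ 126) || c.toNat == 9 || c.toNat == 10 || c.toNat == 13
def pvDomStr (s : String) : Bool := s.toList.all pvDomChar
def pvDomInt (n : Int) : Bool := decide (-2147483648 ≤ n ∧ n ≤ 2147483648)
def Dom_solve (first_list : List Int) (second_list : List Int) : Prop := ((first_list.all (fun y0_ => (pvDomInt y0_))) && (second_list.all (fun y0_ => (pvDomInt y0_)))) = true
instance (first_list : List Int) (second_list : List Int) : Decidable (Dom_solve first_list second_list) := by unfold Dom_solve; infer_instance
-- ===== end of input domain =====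

-- B replaces A's all-pairs character comparison with a set of all non-empty
-- prefixes of the second list's strings, queried once per first-list string
-- (objective: faster).

-- ===== PORT A =====
-- A's inner while loop: walk both strings from index 0 while the characters match.
def lcpA : List Char → List Char → Int
  | a :: as, b :: bs => if a = b then 1 + lcpA as bs else 0
  | _, _ => 0

def solve (first_list : List Int) (second_list : List Int) : Int :=
  first_list.foldl
    (fun longest n1 =>
      second_list.foldl
        (fun l n2 => max l (lcpA (PySem.Int.toChars n1) (PySem.Int.toChars n2)))
        longest)
    0

-- ===== PORT B =====
-- 'for num in second_list: p = ""; for ch in str(num): p += ch; prefixes.add(p)'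
def buildPrefixes (second_list : List Int) : PySem.Set String :=
  second_list.foldl
    (fun acc n =>
      ((PySem.Int.toChars n).foldl
        (fun (st : PySem.Set String × String) c =>
          (PySem.Set.add st.1 (st.2.push c), st.2.push c))
        (acc, "")).1)
    PySem.Set.empty

def solve_alt (first_list : List Int) (second_list : List Int) : Int :=
  let prefixes := buildPrefixes second_list
  first_list.foldl
    (fun best n =>
      ((PySem.Int.toChars n).foldl
        (fun (st : Int × String × Int) c =>
          (if PySem.Set.contains prefixes (st.2.1.push c) then max st.1 (st.2.2 + 1) else st.1,
           st.2.1.push c, st.2.2 + 1))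
        (best, "", 0)).1)
    0

-- ===== PRECONDITION & SPEC =====
def Spec_solve (first_list : List Int) (second_list : List Int) (out : Int) : Prop := out = solve_alt first_list second_list
instance (first_list : List Int) (second_list : List Int) (out : Int) : Decidable (Spec_solve first_list second_list out) := by unfold Spec_solve; infer_instance

-- ===== CLAIM (what is proved, stated in full; the proofs are below) =====
def Claim_equal_solve : Prop := ∀ (first_list : List Int) (second_list : List Int), Dom_solve first_list second_list → Spec_solve first_list second_list (solve first_list second_list)

-- ===== LEMMAS AND PROOFS =====

theorem push_ofList (l : List Char) (c : Char) :
    (String.ofList l).push c = String.ofList (l ++ [c]) := by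
  rw [← String.toList_inj]; simp [String.toList_push]

-- Nat-valued longest common prefix, the spec both ports are reduced to.
def lcpN : List Char → List Char → Nat
  | a :: as, b :: bs => if a = b then 1 + lcpN as bs else 0
  | _, _ => 0

theorem lcpA_eq_lcpN (s t : List Char) : lcpA s t = (lcpN s t : Int) := by
  induction s generalizing t with
  | nil => cases t <;> simp [lcpA, lcpN]
  | cons a as ih =>
    cases t with
    | nil => simp [lcpA, lcpN]
    | cons b bs =>
      by_cases h : a = b <;> simp [lcpA, lcpN, h, ih]

theorem lcpA_nonneg (s t : List Char) : 0 ≤ lcpA s t := by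
  rw [lcpA_eq_lcpN]; exact Int.natCast_nonneg _

theorem lcpN_le_left (s t : List Char) : lcpN s t ≤ s.length := by
  induction s generalizing t with
  | nil => cases t <;> simp [lcpN]
  | cons a as ih =>
    cases t with
    | nil => simp [lcpN]
    | cons b bs =>
      by_cases h : a = b <;> simp [lcpN, h]
      have := ih bs; omega

theorem lcpN_le_right (s t : List Char) : lcpN s t ≤ t.length := by
  induction s generalizing t with
  | nil => cases t <;> simp [lcpN]
  | cons a as ih =>
    cases t with
    | nil => simp [lcpN]
    | cons b bs =>
      by_cases h : a = b <;> simp [lcpN, h]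
      have := ih bs; omega

theorem take_lcpN_eq (s t : List Char) : s.take (lcpN s t) = t.take (lcpN s t) := by
  induction s generalizing t with
  | nil => cases t <;> simp [lcpN]
  | cons a as ih =>
    cases t with
    | nil => simp [lcpN]
    | cons b bs =>
      by_cases h : a = b
      · subst h
        rw [show lcpN (a :: as) (a :: bs) = lcpN as bs + 1 from by
          simp [lcpN, Nat.add_comm]]
        simp [List.take_succ_cons, ih bs]
      · simp [lcpN, h]

theorem le_lcpN_of_take_eq (s t : List Char) (k : Nat) (hk : k ≤ s.length)
    (h : s.take k = t.take k) : k ≤ lcpN s t := by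
  induction k generalizing s t with
  | zero => exact Nat.zero_le _
  | succ k ih =>
    cases s with
    | nil => simp at hk
    | cons a as =>
      cases t with
      | nil => simp at h
      | cons b bs =>
        simp only [List.take_succ_cons, List.cons.injEq] at h
        simp only [lcpN, h.1, if_pos]
        have := ih as bs (by simpa using hk) h.2
        omega

-- maximum-of-a-fold helpers (Int, base 0, all values nonnegative)
theorem foldr_max_nonneg {α : Type} (f : α → Int) (l : List α) :
    0 ≤ (l.map f).foldr max 0 := by
  induction l with
  | nil => simp
  | cons x xs ih => simpa using Or.inr ih

theorem le_foldr_max {α : Type} (f : α → Int) (l : List α) (x : α) (hx : x ∈ l) :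
    f x ≤ (l.map f).foldr max 0 := by
  induction l with
  | nil => simp at hx
  | cons y ys ih =>
    rcases List.mem_cons.mp hx with rfl | hx
    · simp only [List.map_cons, List.foldr_cons]
      exact le_max_left _ _
    · simpa using Or.inr (ih hx)

theorem foldr_max_le {α : Type} (f : α → Int) (X : Int) (hX : 0 ≤ X) (l : List α)
    (h : ∀ x ∈ l, f x ≤ X) : (l.map f).foldr max 0 ≤ X := by
  induction l with
  | nil => simpa using hX
  | cons y ys ih =>
    simp only [List.map_cons, List.foldr_cons, max_le_iff]
    exact ⟨h y (List.mem_cons_self), ih (fun x hx => h x (List.mem_cons_of_mem _ hx))⟩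

theorem foldl_max_eq' {α : Type} (f : α → Int) (step : Int → α → Int) (l : List α) :
    ∀ (b : Int), 0 ≤ b → (∀ x ∈ l, 0 ≤ f x) →
      (∀ b' x, 0 ≤ b' → x ∈ l → step b' x = max b' (f x)) →
      l.foldl step b = max b ((l.map f).foldr max 0) := by
  induction l with
  | nil => intro b hb _ _; simpa using hb
  | cons x xs ih =>
    intro b hb hf hstep
    simp only [List.foldl_cons, List.map_cons, List.foldr_cons]
    rw [hstep b x hb (List.mem_cons_self)]
    rw [ih (max b (f x)) (le_trans hb (le_max_left _ _))
          (fun y hy => hf y (List.mem_cons_of_mem _ hy))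
          (fun b' y hb' hy => hstep b' y hb' (List.mem_cons_of_mem _ hy))]
    rw [max_assoc]

-- membership in the prefix set
theorem mem_buildOne (x : String) (s : List Char) :
    ∀ (done : List Char) (acc : PySem.Set String),
      x ∈ (s.foldl
            (fun (st : PySem.Set String × String) c =>
              (PySem.Set.add st.1 (st.2.push c), st.2.push c))
            (acc, String.ofList done)).1 ↔
        x ∈ acc ∨ ∃ k, 0 < k ∧ k ≤ s.length ∧ x = String.ofList (done ++ s.take k) := by
  induction s with
  | nil =>
    intro done acc
    simp only [List.foldl_nil, List.length_nil]
    constructor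
    · exact Or.inl
    · rintro (h | ⟨k, hk, hk0, _⟩)
      · exact h
      · omega
  | cons c cs ih =>
    intro done acc
    simp only [List.foldl_cons, push_ofList]
    rw [ih (done ++ [c]) (PySem.Set.add acc (String.ofList (done ++ [c])))]
    rw [PySem.Set.mem_add]
    constructor
    · rintro ((h | h) | ⟨k, hk, hkl, hx⟩)
      · exact Or.inl h
      · refine Or.inr ⟨1, Nat.one_pos, by simp, ?_⟩
        simpa using h
      · refine Or.inr ⟨k + 1, Nat.succ_pos _, by simpa using Nat.succ_le_succ hkl, ?_⟩
        rw [hx]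
        simp [List.take_succ_cons, List.append_assoc]
    · rintro (h | ⟨k, hk, hkl, hx⟩)
      · exact Or.inl (Or.inl h)
      · cases k with
        | zero => omega
        | succ k =>
          cases Nat.eq_zero_or_pos k with
          | inl h0 =>
            subst h0
            refine Or.inl (Or.inr ?_)
            simpa using hx
          | inr hpos =>
            refine Or.inr ⟨k, hpos, by simpa using hkl, ?_⟩
            rw [hx]
            simp [List.take_succ_cons, List.append_assoc]

theorem mem_buildPrefixes (x : String) (second_list : List Int) :
    x ∈ buildPrefixes second_list ↔
      ∃ n ∈ second_list, ∃ k, 0 < k ∧ k ≤ (PySem.Int.toChars n).length ∧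
        x = String.ofList ((PySem.Int.toChars n).take k) := by
  have h0 : ("" : String) = String.ofList ([] : List Char) := by
    rw [← String.toList_inj]
  have main : ∀ (l : List Int) (acc : PySem.Set String),
      x ∈ l.foldl
            (fun acc n =>
              ((PySem.Int.toChars n).foldl
                (fun (st : PySem.Set String × String) c =>
                  (PySem.Set.add st.1 (st.2.push c), st.2.push c))
                (acc, "")).1)
            acc ↔
        x ∈ acc ∨ ∃ n ∈ l, ∃ k, 0 < k ∧ k ≤ (PySem.Int.toChars n).length ∧
          x = String.ofList ((PySem.Int.toChars n).take k) := by
    intro l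
    induction l with
    | nil => intro acc; simp
    | cons n ns ih =>
      intro acc
      simp only [List.foldl_cons]
      rw [ih, h0, mem_buildOne x (PySem.Int.toChars n) [] acc]
      simp only [List.nil_append]
      constructor
      · rintro ((h | ⟨k, hk⟩) | ⟨m, hm, hrest⟩)
        · exact Or.inl h
        · exact Or.inr ⟨n, List.mem_cons_self, k, hk⟩
        · exact Or.inr ⟨m, List.mem_cons_of_mem _ hm, hrest⟩
      · rintro (h | ⟨m, hm, hrest⟩)
        · exact Or.inl (Or.inl h)
        · rcases List.mem_cons.mp hm with hm' | hm'
          · subst hm'; exact Or.inl (Or.inr hrest)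
          · exact Or.inr ⟨m, hm', hrest⟩
  rw [buildPrefixes, main]
  simp [PySem.Set.empty]

-- the value B's inner character scan adds on top of its accumulator
def Q (P : PySem.Set String) : List Char → List Char → Int
  | _, [] => 0
  | done, c :: cs =>
      max (if PySem.Set.contains P (String.ofList (done ++ [c])) then ((done.length : Int) + 1) else 0)
        (Q P (done ++ [c]) cs)

theorem Q_nonneg (P : PySem.Set String) (s : List Char) :
    ∀ done, 0 ≤ Q P done s := by
  induction s with
  | nil => intro done; simp [Q]
  | cons c cs ih =>
    intro done
    exact le_trans (ih (done ++ [c])) (le_max_right _ _)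

theorem qfold (P : PySem.Set String) (s : List Char) :
    ∀ (done : List Char) (b : Int), 0 ≤ b →
      (s.foldl
        (fun (st : Int × String × Int) c =>
          (if PySem.Set.contains P (st.2.1.push c) then max st.1 (st.2.2 + 1) else st.1,
           st.2.1.push c, st.2.2 + 1))
        (b, String.ofList done, (done.length : Int))).1 = max b (Q P done s) := by
  induction s with
  | nil =>
    intro done b hb
    simp only [List.foldl_nil, Q]
    omega
  | cons c cs ih =>
    intro done b hb
    simp only [List.foldl_cons, push_ofList]
    have hlen : (done.length : Int) + 1 = (((done ++ [c]).length : Nat) : Int) := by simp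
    rw [hlen]
    by_cases hc : PySem.Set.contains P (String.ofList (done ++ [c])) = true
    · rw [if_pos hc, ih (done ++ [c]) _ (le_trans hb (le_max_left _ _))]
      have hQ : Q P done (c :: cs) = max ((done.length : Int) + 1) (Q P (done ++ [c]) cs) := by
        simp only [Q]; rw [if_pos hc]
      rw [hQ, hlen, max_assoc]
    · rw [if_neg hc, ih (done ++ [c]) _ hb]
      have hQ : Q P done (c :: cs) = max 0 (Q P (done ++ [c]) cs) := by
        simp only [Q]; rw [if_neg hc]
      rw [hQ]
      have := Q_nonneg P cs (done ++ [c])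
      omega

theorem le_Q (P : PySem.Set String) (s : List Char) :
    ∀ (done : List Char) (k : Nat), 0 < k → k ≤ s.length →
      String.ofList (done ++ s.take k) ∈ P →
      (done.length : Int) + k ≤ Q P done s := by
  induction s with
  | nil => intro done k hk hkl _; simp at hkl; omega
  | cons c cs ih =>
    intro done k hk hkl hmem
    cases k with
    | zero => omega
    | succ k =>
      cases Nat.eq_zero_or_pos k with
      | inl h0 =>
        subst h0
        simp only [List.take_succ_cons, List.take_zero] at hmem
        have hc : PySem.Set.contains P (String.ofList (done ++ [c])) := by
          rw [PySem.Set.contains_iff]; exact hmem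
        simp only [Q, hc, if_true]
        have : ((done.length : Int) + 1) ≤ max ((done.length : Int) + 1) (Q P (done ++ [c]) cs) :=
          le_max_left _ _
        omega
      | inr hpos =>
        have h1 : ((done ++ [c]).length : Int) + k ≤ Q P (done ++ [c]) cs := by
          apply ih (done ++ [c]) k hpos (by simp at hkl; omega)
          simpa [List.append_assoc] using hmem
        have h2 : Q P (done ++ [c]) cs ≤ Q P done (c :: cs) := le_max_right _ _
        simp only [List.length_append, List.length_cons, List.length_nil] at h1
        push_cast at h1 ⊢
        omega

theorem Q_le (P : PySem.Set String) (X : Int) (hX : 0 ≤ X) (s : List Char) :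
    ∀ (done : List Char),
      (∀ k : Nat, 0 < k → k ≤ s.length →
        String.ofList (done ++ s.take k) ∈ P → (done.length : Int) + k ≤ X) →
      Q P done s ≤ X := by
  induction s with
  | nil => intro done _; simpa [Q] using hX
  | cons c cs ih =>
    intro done h
    simp only [Q, max_le_iff]
    constructor
    · by_cases hc : PySem.Set.contains P (String.ofList (done ++ [c]))
      · simp only [hc, if_true]
        have := h 1 (by omega) (by simp) (by
          simpa using (PySem.Set.contains_iff _ _).mp hc)
        push_cast at this ⊢
        omega
      · rw [if_neg hc]; exact hX
    · apply ih (done ++ [c])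
      intro k hk hkl hmem
      have := h (k + 1) (by omega) (by simp; omega) (by
        simp only [List.take_succ_cons]
        simpa [List.append_assoc] using hmem)
      simp only [List.length_append, List.length_cons, List.length_nil]
      push_cast at this ⊢
      omega

-- B's per-string scan value equals A's per-string inner maximum
theorem Q_eq_g (second_list : List Int) (s : List Char) :
    Q (buildPrefixes second_list) [] s =
      (second_list.map (fun n2 => lcpA s (PySem.Int.toChars n2))).foldr max 0 := by
  apply le_antisymm
  · apply Q_le _ _ (foldr_max_nonneg _ _)
    intro k hk hkl hmem
    simp only [List.nil_append] at hmem
    rw [mem_buildPrefixes] at hmem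
    obtain ⟨n, hn, j, hj, hjl, hx⟩ := hmem
    rw [String.ofList_inj] at hx
    have hlenk : (s.take k).length = k := by simp; omega
    have hlenj : ((PySem.Int.toChars n).take j).length = j := by simp; omega
    have hjk : j = k := by rw [hx] at hlenk; omega
    subst hjk
    have hle : j ≤ lcpN s (PySem.Int.toChars n) := le_lcpN_of_take_eq _ _ j hkl hx
    have hfold : lcpA s (PySem.Int.toChars n) ≤
        (second_list.map (fun n2 => lcpA s (PySem.Int.toChars n2))).foldr max 0 :=
      le_foldr_max _ _ _ hn
    have hji : (j : Int) ≤ lcpA s (PySem.Int.toChars n) := by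
      rw [lcpA_eq_lcpN]; exact_mod_cast hle
    simp only [List.length_nil]
    push_cast
    omega
  · apply foldr_max_le _ _ (Q_nonneg _ _ _)
    intro n hn
    rcases Nat.eq_zero_or_pos (lcpN s (PySem.Int.toChars n)) with h0 | hpos
    · rw [lcpA_eq_lcpN, h0]; exact Q_nonneg _ _ _
    · have hmem : String.ofList ([] ++ s.take (lcpN s (PySem.Int.toChars n))) ∈
          buildPrefixes second_list := by
        rw [mem_buildPrefixes]
        refine ⟨n, hn, lcpN s (PySem.Int.toChars n), hpos, lcpN_le_right s _, ?_⟩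
        simp only [List.nil_append]
        rw [take_lcpN_eq s (PySem.Int.toChars n)]
      have := le_Q (buildPrefixes second_list) s [] (lcpN s (PySem.Int.toChars n)) hpos
        (lcpN_le_left s _) hmem
      rw [lcpA_eq_lcpN]
      simpa using this

-- ===== VERDICT (by name: the statement is the Claim_ definition above) =====
theorem solve_spec : Claim_equal_solve := by
  intro first second _
  unfold Spec_solve
  have hA : solve first second =
      max 0 ((first.map (fun n1 =>
        ((second.map (fun n2 => lcpA (PySem.Int.toChars n1) (PySem.Int.toChars n2))).foldr max 0))).foldr max 0) := by
    unfold solve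
    apply foldl_max_eq'
    · omega
    · intro x _; exact foldr_max_nonneg _ _
    · intro b' x hb' _
      apply foldl_max_eq'
      · exact hb'
      · intro y _; exact lcpA_nonneg _ _
      · intro b'' y _ _; rfl
  have hB : solve_alt first second =
      max 0 ((first.map (fun n1 => Q (buildPrefixes second) [] (PySem.Int.toChars n1))).foldr max 0) := by
    unfold solve_alt
    apply foldl_max_eq'
    · omega
    · intro x _; exact Q_nonneg _ _ _
    · intro b' x hb' _
      have h0 : (b', ("" : String), (0 : Int)) =
          (b', String.ofList ([] : List Char), ((([] : List Char).length : Nat) : Int)) := by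
        rfl
      rw [h0]
      exact qfold (buildPrefixes second) (PySem.Int.toChars x) [] b' hb'
  rw [hA, hB]
  congr 1
  apply congrArg (List.foldr max 0)
  apply List.map_congr_left
  intro n1 _
  exact (Q_eq_g second (PySem.Int.toChars n1)).symm
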